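-- pv_equiv track=rewrite | github.com/nikhilpinnaparaju/Bomberman | grid.py | convert
-- ===== SOURCE A (Python) =====
-- lines = 19
--
-- columns = 19
--
-- def convert(grid):
--     output = [[" " for i in range(4 * columns)] for j in range(2 * lines)]
--     for i in range(len(grid)):
--         for j in range(len(grid)):
--             output[2 * j][4 * i] = grid[i][j]
--             output[2 * j][4 * i + 1] = grid[i][j]
--             output[2 * j][4 * i + 2] = grid[i][j]
--             output[2 * j][4 * i + 3] = grid[i][j]
--             output[2 * j + 1][4 * i] = grid[i][j]
--             output[2 * j + 1][4 * i + 1] = grid[i][j]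
--             output[2 * j + 1][4 * i + 2] = grid[i][j]
--             output[2 * j + 1][4 * i + 3] = grid[i][j]
--
--     return output
-- ===== SOURCE B (Python) =====
-- lines = 19
--
-- columns = 19
--
-- def convert(grid):
--     n = len(grid)
--     return [[grid[c // 4][r // 2] if c // 4 < n and r // 2 < n else " "
--              for c in range(4 * columns)]
--             for r in range(2 * lines)]
-- ===== Notes on version B (the rewrite author's own statement) =====
-- stated objective: idiomatic
-- what changed: B builds the 38x76 output output-driven with one comprehension, reading each destination cell from the source via integer division (grid[c//4][r//2]), instead of preallocating a padded grid and scattering eight writes per source cell.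
import Mathlib
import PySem

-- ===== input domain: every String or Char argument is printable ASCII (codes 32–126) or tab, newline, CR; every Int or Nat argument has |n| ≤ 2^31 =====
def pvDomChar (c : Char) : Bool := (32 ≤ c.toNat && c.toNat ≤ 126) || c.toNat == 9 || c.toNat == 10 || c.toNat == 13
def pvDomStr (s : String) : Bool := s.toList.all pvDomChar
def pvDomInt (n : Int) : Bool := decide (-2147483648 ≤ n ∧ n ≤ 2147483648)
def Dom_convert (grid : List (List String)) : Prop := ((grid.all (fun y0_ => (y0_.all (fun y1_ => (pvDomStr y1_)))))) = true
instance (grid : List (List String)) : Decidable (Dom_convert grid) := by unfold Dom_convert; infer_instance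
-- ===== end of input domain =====

-- B rewrites A's preallocate-and-scatter (eight writes per source cell into a padded
-- 38x76 grid) as one output-driven comprehension reading grid[c//4][r//2].

-- ===== PORT A =====
-- module constants `lines = 19`, `columns = 19`
def gLines : Nat := 19
def gColumns : Nat := 19

-- the body of A's double loop: the eight assignment statements, in order.
-- `output[x][y] = v` is `output.modify x (·.set y v)`: exact here because under
-- Pre_convert every written index is in range (Python raises IndexError otherwise).
def blockA (grid : List (List String)) (i : Nat) (output : List (List String)) (j : Nat) :
    List (List String) :=
  let v := (grid.getD i []).getD j " "   -- grid[i][j]; in range under Pre_convert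
  let output := output.modify (2*j) (fun row => row.set (4*i) v)
  let output := output.modify (2*j) (fun row => row.set (4*i+1) v)
  let output := output.modify (2*j) (fun row => row.set (4*i+2) v)
  let output := output.modify (2*j) (fun row => row.set (4*i+3) v)
  let output := output.modify (2*j+1) (fun row => row.set (4*i) v)
  let output := output.modify (2*j+1) (fun row => row.set (4*i+1) v)
  let output := output.modify (2*j+1) (fun row => row.set (4*i+2) v)
  let output := output.modify (2*j+1) (fun row => row.set (4*i+3) v)
  output

def convert (grid : List (List String)) : List (List String) :=
  let output := (List.range (2*gLines)).map (fun _ => (List.range (4*gColumns)).map (fun _ => " "))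
  (List.range grid.length).foldl
    (fun output i => (List.range grid.length).foldl (blockA grid i) output) output

-- ===== PORT B =====
def convert_alt (grid : List (List String)) : List (List String) :=
  let n := grid.length
  (List.range (2*gLines)).map (fun r =>
    (List.range (4*gColumns)).map (fun c =>
      -- grid[c // 4][r // 2]; in range under Pre_convert (guarded by the if)
      if c / 4 < n ∧ r / 2 < n then (grid.getD (c/4) []).getD (r/2) " " else " "))

-- ===== PRECONDITION & SPEC =====
-- Pre_ excludes exactly the inputs where Python A raises IndexError: a grid with more
-- than 19 rows (writes land outside the 38x76 output) or a row shorter than the number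
-- of rows (grid[i][j] read out of range). A returns normally on every other input.
def Pre_convert (grid : List (List String)) : Prop :=
  grid.length ≤ 19 ∧ ∀ row ∈ grid, grid.length ≤ row.length
instance (grid : List (List String)) : Decidable (Pre_convert grid) := by
  unfold Pre_convert; infer_instance
def pvWitness_convert : List (List String) := [["#", "."], [".", "x"]]

def Spec_convert (grid : List (List String)) (out : List (List String)) : Prop :=
  out = convert_alt grid
instance (grid : List (List String)) (out : List (List String)) : Decidable (Spec_convert grid out) := by
  unfold Spec_convert; infer_instance

-- ===== CLAIM (what is proved, stated in full; the proofs are below) =====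
def Claim_equal_convert : Prop :=
  ∀ (grid : List (List String)), Dom_convert grid → Pre_convert grid →
    Spec_convert grid (convert grid)

-- ===== LEMMAS AND PROOFS =====

-- the cell read `out[r][c]` (default-totalised), and the source read `grid[i][j]`
def cellOf (out : List (List String)) (r c : Nat) : String := (out.getD r []).getD c " "
def srcOf (grid : List (List String)) (i j : Nat) : String := (grid.getD i []).getD j " "
-- output shape invariant: 38 rows of 76 cells
def ShapeOk (out : List (List String)) : Prop :=
  out.length = 38 ∧ ∀ r, r < 38 → (out.getD r []).length = 76
-- one row's worth of blockA's four writes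
def set4 (i : Nat) (v : String) (row : List String) : List String :=
  (((row.set (4*i) v).set (4*i+1) v).set (4*i+2) v).set (4*i+3) v

theorem getD_modify_row (out : List (List String)) (k : Nat)
    (f : List String → List String) (r : Nat) :
    (out.modify k f).getD r [] =
      if r = k ∧ r < out.length then f (out.getD r []) else out.getD r [] := by
  by_cases hk : r = k
  · subst hk
    by_cases hlt : r < out.length
    · simp [List.getD_eq_getElem?_getD, hlt]
    · simp [List.getD_eq_getElem?_getD, hlt]
  · simp [List.getD_eq_getElem?_getD, hk, Ne.symm hk]


theorem getD_set_col (row : List String) (k : Nat) (v : String) (c : Nat) :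
    (row.set k v).getD c " " =
      if c = k ∧ c < row.length then v else row.getD c " " := by
  by_cases hk : c = k
  · subst hk
    by_cases hlt : c < row.length <;>
      simp [List.getD_eq_getElem?_getD, hlt]
  · simp [List.getD_eq_getElem?_getD, hk, Ne.symm hk]

theorem getD_set4 (row : List String) (hrow : row.length = 76) (i : Nat) (hi : i ≤ 18)
    (v : String) (c : Nat) :
    (set4 i v row).getD c " " = if c / 4 = i then v else row.getD c " " := by
  simp only [set4, getD_set_col, List.length_set, hrow]
  split_ifs <;> first | rfl | omega

theorem row_blockA (grid : List (List String)) (i j : Nat) (out : List (List String))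
    (hlen : out.length = 38) (r : Nat) :
    (blockA grid i out j).getD r [] =
      if (r = 2*j ∨ r = 2*j+1) ∧ r < 38
      then set4 i (srcOf grid i j) (out.getD r [])
      else out.getD r [] := by
  simp only [blockA, set4, srcOf, getD_modify_row, List.length_modify, hlen]
  split_ifs <;> first | rfl | omega

theorem cell_blockA (grid : List (List String)) (i j : Nat) (hi : i ≤ 18) (hj : j ≤ 18)
    (out : List (List String)) (hS : ShapeOk out) (r c : Nat) :
    cellOf (blockA grid i out j) r c =
      if c / 4 = i ∧ r / 2 = j then srcOf grid i j else cellOf out r c := by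
  unfold cellOf
  rw [row_blockA grid i j out hS.1 r]
  by_cases hr : (r = 2*j ∨ r = 2*j+1) ∧ r < 38
  · rw [if_pos hr, getD_set4 _ (hS.2 r hr.2) i hi]
    split_ifs <;> first | rfl | omega
  · rw [if_neg hr]
    have : ¬ (c / 4 = i ∧ r / 2 = j) := by
      intro h
      exact hr ⟨by omega, by omega⟩
    rw [if_neg this]

theorem shape_blockA (grid : List (List String)) (i j : Nat) (out : List (List String))
    (hS : ShapeOk out) : ShapeOk (blockA grid i out j) := by
  refine ⟨by simp [blockA, List.length_modify, hS.1], fun r hr => ?_⟩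
  rw [row_blockA grid i j out hS.1 r]
  split_ifs with h
  · simp only [set4, List.length_set]
    exact hS.2 r hr
  · exact hS.2 r hr

theorem shape_foldl {σ : Type} (step : List (List String) → σ → List (List String))
    (hstep : ∀ out x, ShapeOk out → ShapeOk (step out x)) (l : List σ) :
    ∀ out, ShapeOk out → ShapeOk (l.foldl step out) := by
  induction l with
  | nil => intro out h; exact h
  | cons x xs ih => intro out h; exact ih _ (hstep out x h)

theorem cell_inner (grid : List (List String)) (i : Nat) (hi : i ≤ 18) (b : Nat)
    (hb : b ≤ 19) (out : List (List String)) (hS : ShapeOk out) (r c : Nat) :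
    cellOf ((List.range b).foldl (blockA grid i) out) r c =
      if c / 4 = i ∧ r / 2 < b then srcOf grid i (r / 2) else cellOf out r c := by
  induction b with
  | zero => simp
  | succ b ih =>
    rw [List.range_succ, List.foldl_append, List.foldl_cons, List.foldl_nil]
    have hSb : ShapeOk ((List.range b).foldl (blockA grid i) out) :=
      shape_foldl _ (fun o x hS' => shape_blockA grid i x o hS') _ out hS
    rw [cell_blockA grid i b hi (by omega) _ hSb, ih (by omega)]
    by_cases h1 : c / 4 = i ∧ r / 2 = b
    · rw [if_pos h1, if_pos ⟨h1.1, by omega⟩, h1.2]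
    · rw [if_neg h1]
      by_cases h2 : c / 4 = i ∧ r / 2 < b
      · rw [if_pos h2, if_pos ⟨h2.1, by omega⟩]
      · rw [if_neg h2, if_neg (by omega)]

theorem cell_outer (grid : List (List String)) (hn : grid.length ≤ 19) (a : Nat)
    (ha : a ≤ 19) (out : List (List String)) (hS : ShapeOk out) (r c : Nat) :
    cellOf ((List.range a).foldl
        (fun o i => (List.range grid.length).foldl (blockA grid i) o) out) r c =
      if c / 4 < a ∧ r / 2 < grid.length then srcOf grid (c / 4) (r / 2)
      else cellOf out r c := by
  induction a with
  | zero => simp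
  | succ a ih =>
    rw [List.range_succ, List.foldl_append, List.foldl_cons, List.foldl_nil]
    have hSa : ShapeOk ((List.range a).foldl
        (fun o i => (List.range grid.length).foldl (blockA grid i) o) out) :=
      shape_foldl _ (fun o x hS' =>
        shape_foldl _ (fun o' x' hS'' => shape_blockA grid x x' o' hS'') _ o hS') _ out hS
    rw [cell_inner grid a (by omega) grid.length hn _ hSa, ih (by omega)]
    by_cases h1 : c / 4 = a ∧ r / 2 < grid.length
    · rw [if_pos h1, if_pos ⟨by omega, h1.2⟩, h1.1]
    · rw [if_neg h1]
      by_cases h2 : c / 4 < a ∧ r / 2 < grid.length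
      · rw [if_pos h2, if_pos ⟨by omega, h2.2⟩]
      · rw [if_neg h2, if_neg (by omega)]

def initOut : List (List String) :=
  (List.range (2*gLines)).map (fun _ => (List.range (4*gColumns)).map (fun _ => " "))

theorem initOut_eq : initOut = List.replicate 38 (List.replicate 76 " ") := by
  simp only [initOut, gLines, gColumns]
  rw [List.map_const', List.map_const', List.length_range, List.length_range]

theorem shape_init : ShapeOk initOut := by
  rw [initOut_eq]
  refine ⟨by simp, fun r hr => ?_⟩
  rw [List.getD_eq_getElem?_getD, List.getElem?_replicate, if_pos hr]
  simp

theorem cell_init (r c : Nat) : cellOf initOut r c = " " := by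
  have houter : (List.replicate 38 (List.replicate 76 " ")).getD r [] =
      if r < 38 then List.replicate 76 " " else [] := by
    rw [List.getD_eq_getElem?_getD, List.getElem?_replicate]
    split_ifs <;> rfl
  rw [cellOf, initOut_eq, houter]
  split_ifs with hr
  · rw [List.getD_eq_getElem?_getD, List.getElem?_replicate]
    split_ifs <;> rfl
  · simp

theorem cell_convert (grid : List (List String)) (hn : grid.length ≤ 19) (r c : Nat) :
    cellOf (convert grid) r c =
      if c / 4 < grid.length ∧ r / 2 < grid.length then srcOf grid (c / 4) (r / 2)
      else " " := by
  show cellOf ((List.range grid.length).foldl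
      (fun o i => (List.range grid.length).foldl (blockA grid i) o) initOut) r c = _
  rw [cell_outer grid hn grid.length hn initOut shape_init, cell_init]

theorem shape_convert (grid : List (List String)) : ShapeOk (convert grid) :=
  shape_foldl _ (fun o x hS' =>
    shape_foldl _ (fun o' x' hS'' => shape_blockA grid x x' o' hS'') _ o hS') _
    initOut shape_init

theorem length_alt (grid : List (List String)) : (convert_alt grid).length = 38 := by
  simp [convert_alt, gLines]

theorem row_alt_length (grid : List (List String)) (r : Nat) (hr : r < 38) :
    ((convert_alt grid).getD r []).length = 76 := by
  simp [convert_alt, gLines, gColumns, List.getD_eq_getElem?_getD, hr]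

theorem cell_alt (grid : List (List String)) (r c : Nat) (hr : r < 38) (hc : c < 76) :
    cellOf (convert_alt grid) r c =
      if c / 4 < grid.length ∧ r / 2 < grid.length then srcOf grid (c / 4) (r / 2)
      else " " := by
  simp [cellOf, srcOf, convert_alt, gLines, gColumns, List.getD_eq_getElem?_getD, hr, hc]

theorem cellOf_eq_getElem (out : List (List String)) (r c : Nat)
    (hr : r < out.length) (hc : c < (out[r]'hr).length) :
    cellOf out r c = (out[r]'hr)[c]'hc := by
  rw [cellOf, List.getD_eq_getElem out [] hr]
  exact List.getD_eq_getElem _ " " hc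

-- ===== VERDICT (by name: the statement is the Claim_ definition above) =====
theorem convert_spec : Claim_equal_convert := by
  intro grid _ hpre
  show convert grid = convert_alt grid
  have hn : grid.length ≤ 19 := hpre.1
  have hA := shape_convert grid
  apply List.ext_getElem (by rw [hA.1, length_alt])
  intro r h1 h2
  have hr : r < 38 := by rw [hA.1] at h1; exact h1
  have hA76 : ((convert grid)[r]'h1).length = 76 := by
    rw [← List.getD_eq_getElem _ [] h1]; exact hA.2 r hr
  have hB76 : ((convert_alt grid)[r]'h2).length = 76 := by
    rw [← List.getD_eq_getElem _ [] h2]; exact row_alt_length grid r hr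
  apply List.ext_getElem (by rw [hA76, hB76])
  intro c hc1 hc2
  have hc : c < 76 := by omega
  rw [← cellOf_eq_getElem (convert grid) r c h1 hc1,
      ← cellOf_eq_getElem (convert_alt grid) r c h2 hc2,
      cell_convert grid hn r c, cell_alt grid r c hr hc]
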